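-- pv_equiv track=rewrite | github.com/eronekogin/leetcode | 2024/number_of_pairs_satisfying_inequality.py | number_of_pairs
-- ===== SOURCE A (Python) =====
-- from bisect import bisect_right, insort_right
--
-- def number_of_pairs(nums1: list[int], nums2: list[int], diff: int) -> int:
--     """
--     n1[i] - n1[j] <= n2[i] - n2[j] + diff ===>
--     n1[i] - n2[i] <= n1[j] - n2[j] + diff ===> suppose c[i] = n1[i] - n2[i]
--     c[i] <= c[j] + diff
--
--     find those pairs (i, j) in c.
--     """
--     memo: list[int] = []
--     pairs = 0
--
--     for a, b in zip(nums1, nums2):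
--         d = a - b
--         pairs += bisect_right(memo, d + diff)
--         insort_right(memo, d)
--
--     return pairs
-- ===== SOURCE B (Python) =====
-- def number_of_pairs(nums1: list[int], nums2: list[int], diff: int) -> int:
--     """Merge-sort style divide and conquer: count cross pairs with a two-pointer
--     pass over the two sorted halves, then combine with sorted()."""
--     c = [a - b for a, b in zip(nums1, nums2)]
--
--     def solve(l: list[int]) -> tuple[list[int], int]:
--         # returns (sorted(l), number of pairs i < j with l[i] <= l[j] + diff)
--         n = len(l)
--         if n <= 1:
--             return l, 0
--         sl, cl = solve(l[:n // 2])
--         sr, cr = solve(l[n // 2:])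
--         i = 0
--         cross = 0
--         for y in sr:
--             while i < len(sl) and sl[i] <= y + diff:
--                 i += 1
--             cross += i
--         return sorted(sl + sr), cl + cr + cross
--
--     return solve(c)[1]
-- ===== Notes on version B (the rewrite author's own statement) =====
-- stated objective: faster
-- what changed: Replaces A's incremental sorted list (bisect count + insort insert per element, O(n) insertion each) with a merge-sort style divide-and-conquer that counts cross pairs between the two sorted halves by a linear two-pointer sweep.
import Mathlib
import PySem

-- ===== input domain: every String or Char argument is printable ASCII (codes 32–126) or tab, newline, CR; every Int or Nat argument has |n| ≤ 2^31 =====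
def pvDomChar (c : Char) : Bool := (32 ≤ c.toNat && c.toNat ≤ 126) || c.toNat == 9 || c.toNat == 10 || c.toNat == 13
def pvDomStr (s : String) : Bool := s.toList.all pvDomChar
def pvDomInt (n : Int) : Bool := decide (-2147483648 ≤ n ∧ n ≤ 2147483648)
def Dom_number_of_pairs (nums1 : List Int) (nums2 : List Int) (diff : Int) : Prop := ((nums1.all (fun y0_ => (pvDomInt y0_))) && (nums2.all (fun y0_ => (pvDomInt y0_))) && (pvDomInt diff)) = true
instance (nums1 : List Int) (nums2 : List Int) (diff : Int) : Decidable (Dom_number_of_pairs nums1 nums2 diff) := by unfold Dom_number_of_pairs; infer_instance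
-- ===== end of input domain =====

-- B replaces A's incremental bisect/insort sorted list with a merge-sort style
-- divide-and-conquer counting cross pairs by a two-pointer sweep (measured faster, asymptotic).


-- ===== PORT A =====
-- for a, b in zip(nums1, nums2): d = a-b; pairs += bisect_right(memo, d+diff); insort_right(memo, d)
-- insort_right(memo, d) = memo.insert(bisect_right(memo, d), d), written with take/drop.
def number_of_pairs (nums1 : List Int) (nums2 : List Int) (diff : Int) : Int :=
  ((nums1.zip nums2).foldl
    (fun (st : List Int × Int) ab =>
      let d := ab.1 - ab.2
      let pairs' := st.2 + (PySem.List.bisectRight st.1 (d + diff) : Int)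
      let j := PySem.List.bisectRight st.1 d
      (st.1.take j ++ d :: st.1.drop j, pairs'))
    ([], 0)).2

-- ===== PORT B =====
-- the inner 'while i < len(sl) and sl[i] <= y + diff: i += 1'
def npWhile (diff : Int) (sl : List Int) (y : Int) (i : Nat) : Nat :=
  if h : i < sl.length then
    if sl[i] ≤ y + diff then npWhile diff sl y (i + 1) else i
  else i
termination_by sl.length - i

-- solve(l): returns (sorted(l), pair count of l)
def npSolve (diff : Int) (l : List Int) : List Int × Int :=
  if l.length ≤ 1 then (l, 0)
  else
    let m := l.length / 2
    let pl := npSolve diff (l.take m)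
    let pr := npSolve diff (l.drop m)
    let st := pr.1.foldl (fun (st : Nat × Int) y =>
      let i := npWhile diff pl.1 y st.1
      (i, st.2 + (i : Int))) (0, 0)
    (PySem.List.sorted (pl.1 ++ pr.1) (fun x => x) false, pl.2 + pr.2 + st.2)
termination_by l.length
decreasing_by
  · simp [List.length_take]; omega
  · simp [List.length_drop]; omega

def number_of_pairs_alt (nums1 : List Int) (nums2 : List Int) (diff : Int) : Int :=
  (npSolve diff ((nums1.zip nums2).map (fun ab => ab.1 - ab.2))).2

-- ===== PRECONDITION & SPEC =====
def Spec_number_of_pairs (nums1 : List Int) (nums2 : List Int) (diff : Int) (out : Int) : Prop := out = number_of_pairs_alt nums1 nums2 diff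
instance (nums1 : List Int) (nums2 : List Int) (diff : Int) (out : Int) : Decidable (Spec_number_of_pairs nums1 nums2 diff out) := by unfold Spec_number_of_pairs; infer_instance

-- ===== CLAIM (what is proved, stated in full; the proofs are below) =====
def Claim_equal_number_of_pairs : Prop := ∀ (nums1 : List Int) (nums2 : List Int) (diff : Int), Dom_number_of_pairs nums1 nums2 diff → Spec_number_of_pairs nums1 nums2 diff (number_of_pairs nums1 nums2 diff)

-- ===== LEMMAS AND PROOFS =====

-- the reference count: pairs i < j of l with l[i] ≤ l[j] + diff
def cpCount (diff : Int) : List Int → Int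
  | [] => 0
  | x :: xs => (xs.countP (fun y => decide (x ≤ y + diff)) : Int) + cpCount diff xs

-- cross-pair count, summed over the right list
def crossR (diff : Int) (L R : List Int) : Int :=
  (R.map (fun y => (L.countP (fun x => decide (x ≤ y + diff)) : Int))).sum

-- cross-pair count, summed over the left list
def crossL (diff : Int) (L R : List Int) : Int :=
  (L.map (fun x => (R.countP (fun y => decide (x ≤ y + diff)) : Int))).sum

lemma bisectRight_eq_countP (sl : List Int) (t : Int) (h : sl.Pairwise (· ≤ ·)) :
    PySem.List.bisectRight sl t = sl.countP (fun x => decide (x ≤ t)) := by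
  obtain ⟨hk, hle, hgt⟩ := PySem.List.bisectRight_spec sl t h
  set k := PySem.List.bisectRight sl t with hkdef
  have h1 : (sl.take k).countP (fun x => decide (x ≤ t)) = k := by
    have hall : ∀ a ∈ sl.take k, (fun x => decide (x ≤ t)) a = true := by
      intro a ha
      obtain ⟨j, hj, rfl⟩ := List.mem_iff_getElem.1 ha
      rw [List.getElem_take]
      simp only [decide_eq_true_eq]
      exact hle j (by simp [List.length_take] at hj; omega) (by simp [List.length_take] at hj; omega)
    calc (sl.take k).countP (fun x => decide (x ≤ t)) = (sl.take k).length :=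
          List.countP_eq_length.2 hall
      _ = k := by simp [List.length_take]; omega
  have h2 : (sl.drop k).countP (fun x => decide (x ≤ t)) = 0 := by
    apply List.countP_eq_zero.2
    intro a ha
    obtain ⟨j, hj, rfl⟩ := List.mem_iff_getElem.1 ha
    simp only [decide_eq_true_eq, not_le, List.getElem_drop]
    exact hgt (k + j) (by simp [List.length_drop] at hj; omega) (by omega)
  conv_rhs => rw [← List.take_append_drop k sl]
  rw [List.countP_append, h1, h2]
  omega

lemma sorted_countP_le (sl : List Int) (t : Int) (h : sl.Pairwise (· ≤ ·))
    (j : Nat) (hj : j < sl.length) (hlt : j < sl.countP (fun x => decide (x ≤ t))) :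
    sl[j] ≤ t := by
  rw [← bisectRight_eq_countP sl t h] at hlt
  exact (PySem.List.bisectRight_spec sl t h).2.1 j hj hlt

lemma sorted_countP_gt (sl : List Int) (t : Int) (h : sl.Pairwise (· ≤ ·))
    (j : Nat) (hj : j < sl.length) (hge : sl.countP (fun x => decide (x ≤ t)) ≤ j) :
    t < sl[j] := by
  rw [← bisectRight_eq_countP sl t h] at hge
  exact (PySem.List.bisectRight_spec sl t h).2.2 j hj hge

lemma insort_pairwise (memo : List Int) (d : Int) (h : memo.Pairwise (· ≤ ·)) :
    (memo.take (PySem.List.bisectRight memo d) ++ d :: memo.drop (PySem.List.bisectRight memo d)).Pairwise (· ≤ ·) := by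
  obtain ⟨hk, hle, hgt⟩ := PySem.List.bisectRight_spec memo d h
  set k := PySem.List.bisectRight memo d with hkdef
  have hta : ∀ a ∈ memo.take k, a ≤ d := by
    intro a ha
    obtain ⟨j, hj, rfl⟩ := List.mem_iff_getElem.1 ha
    rw [List.getElem_take]
    exact hle j (by simp [List.length_take] at hj; omega) (by simp [List.length_take] at hj; omega)
  have hdb : ∀ b ∈ memo.drop k, d < b := by
    intro b hb
    obtain ⟨j, hj, rfl⟩ := List.mem_iff_getElem.1 hb
    rw [List.getElem_drop]
    exact hgt (k + j) (by simp [List.length_drop] at hj; omega) (by omega)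
  rw [List.pairwise_append]
  refine ⟨List.Pairwise.sublist (List.take_sublist k memo) h, ?_, ?_⟩
  · rw [List.pairwise_cons]
    exact ⟨fun b hb => le_of_lt (hdb b hb), List.Pairwise.sublist (List.drop_sublist k memo) h⟩
  · intro a ha b hb
    rcases List.mem_cons.1 hb with rfl | hb'
    · exact hta a ha
    · exact le_trans (hta a ha) (le_of_lt (hdb b hb'))

lemma insort_perm (memo : List Int) (d : Int) (j : Nat) :
    (memo.take j ++ d :: memo.drop j).Perm (d :: memo) := by
  have h := @List.perm_middle _ d (memo.take j) (memo.drop j)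
  rwa [List.take_append_drop] at h

lemma crossR_cons_right (diff : Int) (L : List Int) (y : Int) (R : List Int) :
    crossR diff L (y :: R) = (L.countP (fun x => decide (x ≤ y + diff)) : Int) + crossR diff L R := by
  simp [crossR]

lemma crossR_append_singleton_left (diff : Int) (L : List Int) (d : Int) (R : List Int) :
    crossR diff (L ++ [d]) R = crossR diff L R + (R.countP (fun y => decide (d ≤ y + diff)) : Int) := by
  unfold crossR
  rw [show (fun y => (((L ++ [d]).countP (fun x => decide (x ≤ y + diff))) : Int))
        = fun y => ((L.countP (fun x => decide (x ≤ y + diff))) : Int)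
            + (if (fun y' => decide (d ≤ y' + diff)) y = true then (1 : Int) else 0) from
      funext fun y => by
        rw [List.countP_append, List.countP_singleton]
        split_ifs <;> push_cast <;> ring]
  rw [PySem.List.sum_map_add_int, PySem.List.sum_map_ite_one_zero]

lemma crossR_perm_left (diff : Int) {L L' : List Int} (R : List Int) (hp : L.Perm L') :
    crossR diff L R = crossR diff L' R := by
  unfold crossR
  rw [show (fun y => ((L.countP (fun x => decide (x ≤ y + diff))) : Int))
        = fun y => ((L'.countP (fun x => decide (x ≤ y + diff))) : Int) from
    funext fun y => by rw [List.Perm.countP_eq _ hp]]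

lemma crossR_perm_right (diff : Int) (L : List Int) {R R' : List Int} (hp : R.Perm R') :
    crossR diff L R = crossR diff L R' := by
  unfold crossR
  exact List.Perm.sum_eq (hp.map _)

lemma crossL_eq_crossR (diff : Int) (L R : List Int) :
    crossL diff L R = crossR diff L R := by
  induction R with
  | nil => simp [crossL, crossR]
  | cons y R ih =>
    rw [crossR_cons_right, ← ih]
    unfold crossL
    rw [show (fun x => (((y :: R).countP (fun y' => decide (x ≤ y' + diff))) : Int))
          = fun x => ((R.countP (fun y' => decide (x ≤ y' + diff))) : Int)
              + (if (fun x' => decide (x' ≤ y + diff)) x = true then (1 : Int) else 0) from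
      funext fun x => by
        rw [List.countP_cons]
        split_ifs <;> push_cast <;> ring]
    rw [PySem.List.sum_map_add_int, PySem.List.sum_map_ite_one_zero]
    ring

lemma cpCount_append (diff : Int) (L R : List Int) :
    cpCount diff (L ++ R) = cpCount diff L + cpCount diff R + crossL diff L R := by
  induction L with
  | nil => simp [cpCount, crossL]
  | cons x L ih =>
    simp only [List.cons_append, cpCount]
    rw [List.countP_append, ih]
    have hx : crossL diff (x :: L) R
        = ((R.countP (fun y => decide (x ≤ y + diff))) : Int) + crossL diff L R := by
      simp [crossL]
    rw [hx]
    push_cast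
    ring

lemma crossR_nil_left (diff : Int) (R : List Int) :
    crossR diff [] R = 0 := by
  induction R with
  | nil => simp [crossR]
  | cons y R ih => rw [crossR_cons_right, ih]; simp

lemma aLoop_eq (diff : Int) (l : List (Int × Int)) :
    ∀ (memo : List Int) (pairs : Int) (p : List Int),
      memo.Pairwise (· ≤ ·) → memo.Perm p →
      (l.foldl
        (fun (st : List Int × Int) ab =>
          let d := ab.1 - ab.2
          let pairs' := st.2 + (PySem.List.bisectRight st.1 (d + diff) : Int)
          let j := PySem.List.bisectRight st.1 d
          (st.1.take j ++ d :: st.1.drop j, pairs'))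
        (memo, pairs)).2
      = pairs + crossR diff p (l.map (fun ab => ab.1 - ab.2)) + cpCount diff (l.map (fun ab => ab.1 - ab.2)) := by
  induction l with
  | nil => intro memo pairs p _ _; simp [crossR, cpCount]
  | cons ab l ih =>
    intro memo pairs p hmemo hperm
    simp only [List.foldl_cons, List.map_cons]
    have hperm' : (memo.take (PySem.List.bisectRight memo (ab.1 - ab.2))
        ++ (ab.1 - ab.2) :: memo.drop (PySem.List.bisectRight memo (ab.1 - ab.2))).Perm
        (p ++ [ab.1 - ab.2]) :=
      (insort_perm memo _ _).trans ((hperm.cons _).trans (List.perm_append_singleton _ _).symm)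
    rw [ih _ _ _ (insort_pairwise memo _ hmemo) hperm']
    rw [bisectRight_eq_countP memo _ hmemo, List.Perm.countP_eq _ hperm,
        crossR_append_singleton_left, crossR_cons_right]
    simp only [cpCount]
    ring

lemma npWhile_eq (diff : Int) (sl : List Int) (y : Int) (h : sl.Pairwise (· ≤ ·)) :
    ∀ (i : Nat), i ≤ sl.countP (fun x => decide (x ≤ y + diff)) →
      npWhile diff sl y i = sl.countP (fun x => decide (x ≤ y + diff)) := by
  have hstop : npWhile diff sl y (sl.countP (fun x => decide (x ≤ y + diff)))
      = sl.countP (fun x => decide (x ≤ y + diff)) := by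
    rw [npWhile]
    by_cases hk : sl.countP (fun x => decide (x ≤ y + diff)) < sl.length
    · rw [dif_pos hk, if_neg (not_le.2 (sorted_countP_gt sl (y + diff) h _ hk le_rfl))]
    · rw [dif_neg hk]
  have main : ∀ (n i : Nat), sl.countP (fun x => decide (x ≤ y + diff)) - i ≤ n →
      i ≤ sl.countP (fun x => decide (x ≤ y + diff)) →
      npWhile diff sl y i = sl.countP (fun x => decide (x ≤ y + diff)) := by
    intro n
    induction n with
    | zero =>
      intro i h0 hik
      have hie : i = sl.countP (fun x => decide (x ≤ y + diff)) := by omega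
      rw [hie]; exact hstop
    | succ n ihn =>
      intro i h0 hik
      rcases eq_or_lt_of_le hik with hie | hlt
      · rw [hie]; exact hstop
      · have hilen : i < sl.length := lt_of_lt_of_le hlt List.countP_le_length
        rw [npWhile, dif_pos hilen, if_pos (sorted_countP_le sl (y + diff) h i hilen hlt)]
        exact ihn (i + 1) (by omega) (by omega)
  intro i hi
  exact main (sl.countP (fun x => decide (x ≤ y + diff)) - i) i le_rfl hi

lemma npCross_eq (diff : Int) (sl : List Int) (hsl : sl.Pairwise (· ≤ ·)) :
    ∀ (sr : List Int), sr.Pairwise (· ≤ ·) →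
      ∀ (i : Nat) (cross : Int),
        (∀ y ∈ sr, i ≤ sl.countP (fun x => decide (x ≤ y + diff))) →
        (sr.foldl (fun (st : Nat × Int) y =>
          let i := npWhile diff sl y st.1
          (i, st.2 + (i : Int))) (i, cross)).2 = cross + crossR diff sl sr := by
  intro sr
  induction sr with
  | nil => intro _ i cross _; simp [crossR]
  | cons y sr ih =>
    intro hp i cross hbound
    obtain ⟨hy, hsr⟩ := List.pairwise_cons.1 hp
    have hmono : ∀ y' ∈ sr, sl.countP (fun x => decide (x ≤ y + diff))
        ≤ sl.countP (fun x => decide (x ≤ y' + diff)) := by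
      intro y' hy'
      refine List.countP_mono_left (fun x _ hx => ?_)
      simp only [decide_eq_true_eq] at hx ⊢
      linarith [hy y' hy']
    simp only [List.foldl_cons]
    rw [npWhile_eq diff sl y hsl i (hbound y List.mem_cons_self)]
    rw [ih hsr _ _ hmono, crossR_cons_right]
    ring

lemma npSolve_eq (diff : Int) : ∀ (l : List Int),
    npSolve diff l = (PySem.List.sorted l (fun x => x) false, cpCount diff l) := by
  have H : ∀ (n : Nat) (l : List Int), l.length ≤ n →
      npSolve diff l = (PySem.List.sorted l (fun x => x) false, cpCount diff l) := by
    intro n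
    induction n with
    | zero =>
      intro l hl
      have hnil : l = [] := List.eq_nil_of_length_eq_zero (by omega)
      subst hnil
      rw [npSolve]
      simp [cpCount, PySem.List.sorted_eq_self_of_pairwise _ _ List.Pairwise.nil]
    | succ n ihn =>
      intro l hl
      rw [npSolve]
      by_cases h1 : l.length ≤ 1
      · rw [if_pos h1]
        rcases l with _ | ⟨x, _ | ⟨z, t⟩⟩
        · simp [cpCount, PySem.List.sorted_eq_self_of_pairwise _ _ List.Pairwise.nil]
        · simp [cpCount, PySem.List.sorted_eq_self_of_pairwise _ _ (List.pairwise_singleton _ _)]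
        · simp at h1
      · rw [if_neg h1]
        rw [not_le] at h1
        dsimp only
        rw [ihn (l.take (l.length / 2)) (by simp [List.length_take]; omega),
            ihn (l.drop (l.length / 2)) (by simp [List.length_drop]; omega)]
        dsimp only
        have hslp : (PySem.List.sorted (l.take (l.length / 2)) (fun x => x) false).Pairwise (· ≤ ·) :=
          PySem.List.sorted_pairwise _ _
        have hsrp : (PySem.List.sorted (l.drop (l.length / 2)) (fun x => x) false).Pairwise (· ≤ ·) :=
          PySem.List.sorted_pairwise _ _
        rw [npCross_eq diff _ hslp _ hsrp 0 0 (fun y _ => Nat.zero_le _)]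
        have hperm : ((PySem.List.sorted (l.take (l.length / 2)) (fun x => x) false)
            ++ (PySem.List.sorted (l.drop (l.length / 2)) (fun x => x) false)).Perm l := by
          have hp := (PySem.List.sorted_perm (l.take (l.length / 2)) (fun x => x) false).append
            (PySem.List.sorted_perm (l.drop (l.length / 2)) (fun x => x) false)
          rwa [List.take_append_drop] at hp
        refine Prod.ext ?_ ?_
        · exact PySem.List.sorted_eq_sorted_of_perm _ _ _ (fun a b hab => hab) hperm
        · dsimp only
          rw [crossR_perm_left diff _ (PySem.List.sorted_perm _ _ _),
              crossR_perm_right diff _ (PySem.List.sorted_perm _ _ _),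
              ← crossL_eq_crossR]
          conv_rhs => rw [← List.take_append_drop (l.length / 2) l, cpCount_append]
          ring
  intro l
  exact H l.length l le_rfl

-- ===== VERDICT (by name: the statement is the Claim_ definition above) =====
theorem number_of_pairs_spec : Claim_equal_number_of_pairs := by
  intro nums1 nums2 diff _
  unfold Spec_number_of_pairs number_of_pairs number_of_pairs_alt
  rw [aLoop_eq diff _ [] 0 [] List.Pairwise.nil (List.Perm.refl _), npSolve_eq, crossR_nil_left]
  simp
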